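-- pv_equiv track=rewrite | github.com/guncv/Python | 10_TSD/10_TSD_★★_Celebrity .py | find_celeb
-- ===== SOURCE A (Python) =====
-- def is_celeb(R,x) :
--     if x in R and (R[x] == set() or R[x] == {x}) :
--         for i in R :
--             if i == x : pass
--             elif x in R[i] : pass
--             else : return False
--         return True
--     return False
--
-- def find_celeb(R) :
--     l = []
--     for i in R :
--         if is_celeb(R,i) :
--             l.append(i)
--     if len(l) == 0 :
--         return None
--     else : return (' '.join(l)).strip()
-- ===== SOURCE B (Python) =====
-- def find_celeb(R):
--     # Candidate elimination, then one verification pass of the candidate.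
--     if not R:
--         return None
--     keys = list(R)
--     cand = keys[0]
--     for k in keys[1:]:
--         if k in R[cand]:
--             cand = k
--     v = R[cand]
--     if v and v != {cand}:
--         return None
--     for k in keys:
--         if k != cand and cand not in R[k]:
--             return None
--     return cand.strip()
-- ===== Notes on version B (the rewrite author's own statement) =====
-- stated objective: alternative
-- what changed: Replaces the check-every-key scan (is_celeb called for every key) by single-pass candidate elimination followed by one verification pass of the candidate.
import Mathlib
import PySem

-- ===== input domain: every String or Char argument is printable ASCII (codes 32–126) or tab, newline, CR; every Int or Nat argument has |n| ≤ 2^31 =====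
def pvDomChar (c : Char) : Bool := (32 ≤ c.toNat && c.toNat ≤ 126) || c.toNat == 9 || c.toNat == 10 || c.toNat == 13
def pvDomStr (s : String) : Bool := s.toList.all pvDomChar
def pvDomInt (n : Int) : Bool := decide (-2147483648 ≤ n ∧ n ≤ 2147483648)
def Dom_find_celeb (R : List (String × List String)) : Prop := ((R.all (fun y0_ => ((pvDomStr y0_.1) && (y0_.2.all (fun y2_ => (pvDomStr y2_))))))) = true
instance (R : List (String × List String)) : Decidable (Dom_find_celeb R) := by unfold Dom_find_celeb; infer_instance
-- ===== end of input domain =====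

-- B replaces A's check-every-key scan by single-pass candidate elimination plus one verification pass (a different algorithm, not timed as faster here).

-- ===== PORT A =====
-- first-match dict lookup R[x]; A and B only apply it to keys present in R
def pvLookup (R : List (String × List String)) (x : String) : List String :=
  ((R.find? (fun p => p.1 == x)).map Prod.snd).getD []

def is_celeb (R : List (String × List String)) (x : String) : Bool :=
  if (R.any (fun p => p.1 == x)) &&
      (PySem.Set.equal (pvLookup R x) [] || PySem.Set.equal (pvLookup R x) [x]) then
    R.all (fun p => p.1 == x || (pvLookup R p.1).contains x)
  else false

def find_celeb (R : List (String × List String)) : Option String :=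
  let l := R.foldl (fun acc p => if is_celeb R p.1 then acc ++ [p.1] else acc) []
  if l.length == 0 then none
  else some (PySem.Str.strip (PySem.Str.join " " l))

-- ===== PORT B =====
-- one elimination step: 'if k in R[cand]: cand = k'
def pvStep (R : List (String × List String)) (c : String) (p : String × List String) : String :=
  if (pvLookup R c).contains p.1 then p.1 else c

def find_celeb_alt : List (String × List String) → Option String
  | [] => none
  | p0 :: rest =>
    let cand := rest.foldl (pvStep (p0 :: rest)) p0.1
    let v := pvLookup (p0 :: rest) cand
    if !v.isEmpty && !PySem.Set.equal v [cand] then none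
    else if (p0 :: rest).any (fun p => !(p.1 == cand) && !((pvLookup (p0 :: rest) p.1).contains cand)) then none
    else some (PySem.Str.strip cand)

-- ===== PRECONDITION & SPEC =====
-- Pre_ only states the representation invariant of the Python dict argument (distinct keys);
-- every actual Python input satisfies it, so nothing A returns on is excluded.
def Pre_find_celeb (R : List (String × List String)) : Prop := (R.map Prod.fst).Nodup
instance (R : List (String × List String)) : Decidable (Pre_find_celeb R) := by
  unfold Pre_find_celeb; infer_instance

def pvWitness_find_celeb : (List (String × List String)) := [("a", ["b"]), ("b", [])]

def Spec_find_celeb (R : List (String × List String)) (out : Option String) : Prop := out = find_celeb_alt R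
instance (R : List (String × List String)) (out : Option String) : Decidable (Spec_find_celeb R out) := by unfold Spec_find_celeb; infer_instance

-- ===== CLAIM (what is proved, stated in full; the proofs are below) =====
def Claim_equal_find_celeb : Prop := ∀ (R : List (String × List String)), Dom_find_celeb R → Pre_find_celeb R → Spec_find_celeb R (find_celeb R)

-- ===== LEMMAS AND PROOFS =====

theorem any_key_eq_true {R : List (String × List String)} {x : String}
    (h : x ∈ R.map Prod.fst) : (R.any (fun p => p.1 == x)) = true := by
  rcases List.mem_map.mp h with ⟨p, hp, rfl⟩
  exact List.any_eq_true.mpr ⟨p, hp, by simp⟩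

theorem is_celeb_eq (R : List (String × List String)) (x : String) (hk : x ∈ R.map Prod.fst) :
    is_celeb R x = ((PySem.Set.equal (pvLookup R x) [] || PySem.Set.equal (pvLookup R x) [x]) &&
      R.all (fun p => p.1 == x || (pvLookup R p.1).contains x)) := by
  rw [is_celeb, any_key_eq_true hk, Bool.true_and]
  cases h2 : (PySem.Set.equal (pvLookup R x) [] || PySem.Set.equal (pvLookup R x) [x]) <;> simp

theorem celeb_sub {R : List (String × List String)} {x : String}
    (h : is_celeb R x = true) : ∀ y ∈ pvLookup R x, y = x := by
  intro y hy
  rw [is_celeb] at h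
  split at h
  case isTrue hc =>
    rw [Bool.and_eq_true] at hc
    have hor := hc.2
    rw [Bool.or_eq_true] at hor
    rcases hor with h1 | h1
    · have := ((PySem.Set.equal_iff _ _).mp h1 y).mp hy
      simp at this
    · have := ((PySem.Set.equal_iff _ _).mp h1 y).mp hy
      simpa using this
  case isFalse => cases h

theorem celeb_all {R : List (String × List String)} {x : String}
    (h : is_celeb R x = true) :
    ∀ k ∈ R.map Prod.fst, k = x ∨ x ∈ pvLookup R k := by
  intro k hk
  rw [is_celeb] at h
  split at h
  case isFalse => cases h
  case isTrue =>
    rcases List.mem_map.mp hk with ⟨p, hp, rfl⟩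
    have h1 := List.all_eq_true.mp h p hp
    rw [Bool.or_eq_true] at h1
    rcases h1 with h1 | h1
    · exact Or.inl (by simpa using h1)
    · exact Or.inr (by simpa using h1)

theorem celeb_unique {R : List (String × List String)} {c d : String}
    (hc : is_celeb R c = true) (hdk : d ∈ R.map Prod.fst) (hd : is_celeb R d = true) :
    d = c := by
  rcases celeb_all hc d hdk with h | h
  · exact h
  · exact (celeb_sub hd c h).symm

theorem elim_mem_keys (R : List (String × List String)) :
    ∀ (l : List (String × List String)) (c0 : String), (∀ p ∈ l, p ∈ R) → c0 ∈ R.map Prod.fst →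
      l.foldl (pvStep R) c0 ∈ R.map Prod.fst := by
  intro l
  induction l with
  | nil => intro c0 _ h; simpa using h
  | cons p t ih =>
    intro c0 hsub hc0
    rw [List.foldl_cons]
    refine ih _ (fun q hq => hsub q (by simp [hq])) ?_
    rw [pvStep]
    split
    · exact List.mem_map_of_mem (hsub p (by simp))
    · exact hc0

theorem elim_finds {R : List (String × List String)} {c : String}
    (hc : is_celeb R c = true) :
    ∀ (l : List (String × List String)) (c0 : String), (∀ p ∈ l, p ∈ R) → c0 ∈ R.map Prod.fst →
      (c = c0 ∨ c ∈ l.map Prod.fst) → l.foldl (pvStep R) c0 = c := by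
  intro l
  induction l with
  | nil =>
    intro c0 _ _ hin
    rcases hin with rfl | h
    · rfl
    · simp at h
  | cons p t ih =>
    intro c0 hsub hc0 hin
    rw [List.foldl_cons]
    have hpR : p ∈ R := hsub p (by simp)
    refine ih (pvStep R c0 p) (fun q hq => hsub q (by simp [hq])) ?_ ?_
    · rw [pvStep]
      split
      · exact List.mem_map_of_mem hpR
      · exact hc0
    · rcases hin with rfl | hmem
      · left
        rw [pvStep]
        split
        case isTrue h =>
          exact (celeb_sub hc p.1 (by simpa using h)).symm
        case isFalse => rfl
      · rw [List.map_cons, List.mem_cons] at hmem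
        rcases hmem with heq | hmem
        · left
          rw [pvStep]
          split
          case isTrue => exact heq
          case isFalse hns =>
            rcases celeb_all hc c0 hc0 with h0 | h0
            · exact h0.symm
            · exact absurd (by simpa [heq] using h0) (by simpa using hns)
        · exact Or.inr hmem

theorem equal_nil_eq (v : List String) : PySem.Set.equal v [] = v.isEmpty := by
  cases v with
  | nil => rfl
  | cons a t =>
    have hf : PySem.Set.equal (a :: t) ([] : List String) = false := by
      rw [Bool.eq_false_iff]
      intro hcontra
      have := ((PySem.Set.equal_iff _ _).mp hcontra a).mp (by simp)
      simp at this
    simp [hf]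

theorem alt_some {p0 : String × List String} {rest : List (String × List String)}
    (h : is_celeb (p0 :: rest) (rest.foldl (pvStep (p0 :: rest)) p0.1) = true) :
    find_celeb_alt (p0 :: rest) =
      some (PySem.Str.strip (rest.foldl (pvStep (p0 :: rest)) p0.1)) := by
  have hck : (rest.foldl (pvStep (p0 :: rest)) p0.1) ∈ (p0 :: rest).map Prod.fst :=
    elim_mem_keys _ rest p0.1 (fun q hq => by simp [hq]) (by simp)
  rw [is_celeb_eq _ _ hck, Bool.and_eq_true] at h
  obtain ⟨h12, hall⟩ := h
  have hc1 : (!(pvLookup (p0 :: rest) (rest.foldl (pvStep (p0 :: rest)) p0.1)).isEmpty &&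
      !PySem.Set.equal (pvLookup (p0 :: rest) (rest.foldl (pvStep (p0 :: rest)) p0.1))
        [rest.foldl (pvStep (p0 :: rest)) p0.1]) = false := by
    rw [Bool.or_eq_true] at h12
    rcases h12 with h1 | h1
    · rw [equal_nil_eq] at h1; simp [h1]
    · simp [h1]
  have hc2 : ((p0 :: rest).any (fun p => !(p.1 == rest.foldl (pvStep (p0 :: rest)) p0.1) &&
      !((pvLookup (p0 :: rest) p.1).contains (rest.foldl (pvStep (p0 :: rest)) p0.1)))) = false := by
    refine List.any_eq_false.mpr (fun p hp => ?_)
    have h1 := List.all_eq_true.mp hall p hp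
    rw [Bool.or_eq_true] at h1
    rcases h1 with h1 | h1
    · have h1' : p.1 = rest.foldl (pvStep (p0 :: rest)) p0.1 := by simpa using h1
      simp [h1']
    · have h1' : (rest.foldl (pvStep (p0 :: rest)) p0.1) ∈ pvLookup (p0 :: rest) p.1 := by
        simpa using h1
      simp [h1']
  simp only [find_celeb_alt, hc1, hc2]
  simp

theorem alt_none {p0 : String × List String} {rest : List (String × List String)}
    (h : is_celeb (p0 :: rest) (rest.foldl (pvStep (p0 :: rest)) p0.1) = false) :
    find_celeb_alt (p0 :: rest) = none := by
  have hck : (rest.foldl (pvStep (p0 :: rest)) p0.1) ∈ (p0 :: rest).map Prod.fst :=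
    elim_mem_keys _ rest p0.1 (fun q hq => by simp [hq]) (by simp)
  rw [is_celeb_eq _ _ hck] at h
  by_cases hc1 : (!(pvLookup (p0 :: rest) (rest.foldl (pvStep (p0 :: rest)) p0.1)).isEmpty &&
      !PySem.Set.equal (pvLookup (p0 :: rest) (rest.foldl (pvStep (p0 :: rest)) p0.1))
        [rest.foldl (pvStep (p0 :: rest)) p0.1]) = true
  · simp only [find_celeb_alt, hc1]
    simp
  · rw [Bool.not_eq_true] at hc1
    have hall : ((p0 :: rest).all (fun p => p.1 == rest.foldl (pvStep (p0 :: rest)) p0.1 ||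
        (pvLookup (p0 :: rest) p.1).contains (rest.foldl (pvStep (p0 :: rest)) p0.1))) = false := by
      rcases Bool.and_eq_false_iff.mp h with h12 | hall
      · exfalso
        rcases Bool.or_eq_false_iff.mp h12 with ⟨h1, h2⟩
        rw [equal_nil_eq] at h1
        rcases Bool.and_eq_false_iff.mp hc1 with ha | ha
        · rw [Bool.not_eq_false'] at ha
          rw [ha] at h1; cases h1
        · rw [Bool.not_eq_false'] at ha
          rw [ha] at h2; cases h2
      · exact hall
    have hex2 : ∃ p ∈ (p0 :: rest), (p.1 == rest.foldl (pvStep (p0 :: rest)) p0.1 ||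
        (pvLookup (p0 :: rest) p.1).contains (rest.foldl (pvStep (p0 :: rest)) p0.1)) = false := by
      by_contra hno
      have hall' : ∀ p ∈ (p0 :: rest), (p.1 == rest.foldl (pvStep (p0 :: rest)) p0.1 ||
          (pvLookup (p0 :: rest) p.1).contains (rest.foldl (pvStep (p0 :: rest)) p0.1)) = true := by
        intro p hp
        cases hgp : (p.1 == rest.foldl (pvStep (p0 :: rest)) p0.1 ||
            (pvLookup (p0 :: rest) p.1).contains (rest.foldl (pvStep (p0 :: rest)) p0.1))
        · exact absurd ⟨p, hp, hgp⟩ hno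
        · rfl
      rw [List.all_eq_true.mpr hall'] at hall
      cases hall
    obtain ⟨p, hp, hpf⟩ := hex2
    rcases Bool.or_eq_false_iff.mp hpf with ⟨h1, h2⟩
    have hany : ((p0 :: rest).any (fun p => !(p.1 == rest.foldl (pvStep (p0 :: rest)) p0.1) &&
        !((pvLookup (p0 :: rest) p.1).contains (rest.foldl (pvStep (p0 :: rest)) p0.1)))) = true :=
      List.any_eq_true.mpr ⟨p, hp, by
        have h1' : ¬ p.1 = rest.foldl (pvStep (p0 :: rest)) p0.1 := by simpa using h1
        have h2' : (rest.foldl (pvStep (p0 :: rest)) p0.1) ∉ pvLookup (p0 :: rest) p.1 := by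
          simpa using h2
        simp [h1', h2']⟩
    simp only [find_celeb_alt, hany]
    simp [hc1]

theorem singleton_of_nodup_all_eq {l : List String} {a : String}
    (hnd : l.Nodup) (hmem : a ∈ l) (hall : ∀ x ∈ l, x = a) : l = [a] := by
  cases l with
  | nil => cases hmem
  | cons b t =>
    have hb : b = a := hall b (by simp)
    subst hb
    have ht : t = [] := by
      cases t with
      | nil => rfl
      | cons c u =>
        have hc : c = b := hall c (by simp)
        rw [List.nodup_cons] at hnd
        exact absurd (show b ∈ c :: u by simp [hc]) hnd.1
    rw [ht]

-- ===== VERDICT (by name: the statement is the Claim_ definition above) =====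
theorem find_celeb_spec : Claim_equal_find_celeb := by
  intro R _hdom hpre
  unfold Spec_find_celeb
  cases R with
  | nil => rfl
  | cons p0 rest =>
    have hfold : (p0 :: rest).foldl (fun acc p => if is_celeb (p0 :: rest) p.1 then acc ++ [p.1] else acc) [] =
        ((p0 :: rest).filter (fun p => is_celeb (p0 :: rest) p.1)).map (fun p => p.1) := by
      rw [PySem.List.foldl_append_if]
      simp
    by_cases hex : ∃ q ∈ (p0 :: rest), is_celeb (p0 :: rest) q.1 = true
    · obtain ⟨q, hq, hcel⟩ := hex
      have hcand : rest.foldl (pvStep (p0 :: rest)) p0.1 = q.1 := by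
        refine elim_finds hcel rest p0.1 (fun p hp => by simp [hp]) (by simp) ?_
        rcases List.mem_cons.mp hq with rfl | hq'
        · exact Or.inl rfl
        · exact Or.inr (List.mem_map_of_mem hq')
      have halt : find_celeb_alt (p0 :: rest) = some (PySem.Str.strip q.1) := by
        rw [alt_some (by rw [hcand]; exact hcel), hcand]
      have hmapL : ((p0 :: rest).filter (fun p => is_celeb (p0 :: rest) p.1)).map (fun p => p.1) = [q.1] := by
        refine singleton_of_nodup_all_eq ?_ ?_ ?_
        · have hsubl : ((((p0 :: rest).filter (fun p => is_celeb (p0 :: rest) p.1)).map Prod.fst).Sublist ((p0 :: rest).map Prod.fst)) :=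
            List.Sublist.map Prod.fst List.filter_sublist
          exact List.Nodup.sublist hsubl hpre
        · exact List.mem_map_of_mem (List.mem_filter.mpr ⟨hq, hcel⟩)
        · intro x hx
          rcases List.mem_map.mp hx with ⟨p, hpL, rfl⟩
          have hpmem := List.mem_filter.mp hpL
          exact celeb_unique hcel (List.mem_map_of_mem hpmem.1) (by simpa using hpmem.2)
      rw [halt]
      simp only [find_celeb, hfold, hmapL]
      simp [PySem.Str.join]
    · have hnone : ∀ q ∈ (p0 :: rest), is_celeb (p0 :: rest) q.1 = false := by
        intro q hq
        cases hgq : is_celeb (p0 :: rest) q.1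
        · rfl
        · exact absurd ⟨q, hq, hgq⟩ hex
      have hL : (p0 :: rest).filter (fun p => is_celeb (p0 :: rest) p.1) = [] :=
        List.filter_eq_nil_iff.mpr (fun p hp => by simp [hnone p hp])
      have hck := elim_mem_keys (p0 :: rest) rest p0.1 (fun q hq => by simp [hq]) (by simp)
      rcases List.mem_map.mp hck with ⟨q, hq, hq1⟩
      have hfalse : is_celeb (p0 :: rest) (rest.foldl (pvStep (p0 :: rest)) p0.1) = false := by
        rw [← hq1]; exact hnone q hq
      rw [alt_none hfalse]
      simp only [find_celeb, hfold, hL]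
      simp
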